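-- pv_equiv track=rewrite | github.com/PopSergius/univer | security/project_7.py | calculate_block_parity
-- ===== SOURCE A (Python) =====
-- def calculate_block_parity(data, block_size=8, even_parity=True):
--     """
--     Розрахунок поблочного (поздовжнього) контролю парності
--     Повертає контрольну послідовність для перевірки цілісності
--     """
--     # Створення списку для зберігання контрольних бітів
--     parity_bits = []
--
--     # Для кожної позиції біту в блоці
--     for bit_pos in range(block_size):
--         count_ones = 0
--
--         # Рахуємо кількість одиниць в даній позиції для кожного байту
--         for byte in data:
--             if byte & (1 << bit_pos):
--                 count_ones += 1
--
--         # Визначаємо біт парності для даної позиції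
--         if even_parity:
--             # Для парності
--             parity_bit = 0 if count_ones % 2 == 0 else 1
--         else:
--             # Для непарності
--             parity_bit = 0 if count_ones % 2 == 1 else 1
--
--         # Додаємо біт до контрольної послідовності
--         if parity_bit:
--             parity_bits.append(1 << bit_pos)
--         else:
--             parity_bits.append(0)
--
--     # Обчислюємо один байт контрольної суми
--     checksum = 0
--     for bit_value in parity_bits:
--         checksum |= bit_value
--
--     return checksum
-- ===== SOURCE B (Python) =====
-- def calculate_block_parity(data, block_size=8, even_parity=True):
--     # One pass: XOR-reduce all bytes; the even-parity checksum is that XOR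
--     # masked to block_size bits, the odd-parity one is its bitwise complement.
--     x = 0
--     for byte in data:
--         x ^= byte
--     mask = (1 << block_size) - 1 if block_size > 0 else 0
--     return (x if even_parity else ~x) & mask
-- ===== Notes on version B (the rewrite author's own statement) =====
-- stated objective: faster
-- what changed: Replaces A's outer loop over bit positions (each doing a full pass over the data plus a parity-bit list and an OR-fold) by a single XOR-reduction of the data followed by one mask (and one complement for odd parity).
import Mathlib
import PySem

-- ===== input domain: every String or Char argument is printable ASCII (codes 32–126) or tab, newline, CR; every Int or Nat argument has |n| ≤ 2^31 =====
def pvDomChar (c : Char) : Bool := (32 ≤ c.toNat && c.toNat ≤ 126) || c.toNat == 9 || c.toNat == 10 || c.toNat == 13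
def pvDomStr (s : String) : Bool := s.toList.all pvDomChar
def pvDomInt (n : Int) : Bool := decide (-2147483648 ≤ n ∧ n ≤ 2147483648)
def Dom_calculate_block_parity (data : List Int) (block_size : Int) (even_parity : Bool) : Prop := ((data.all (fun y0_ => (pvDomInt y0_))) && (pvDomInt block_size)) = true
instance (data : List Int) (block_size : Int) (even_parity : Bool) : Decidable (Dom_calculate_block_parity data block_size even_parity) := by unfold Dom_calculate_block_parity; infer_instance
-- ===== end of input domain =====

-- B replaces A's per-bit-position counting loop (block_size passes over the data) by a single
-- XOR-reduction of the data followed by one mask/complement step.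

-- ===== PORT A =====
-- bit_pos ranges over range(block_size), so 0 ≤ bit_pos and '.toNat' is exact;
-- count_ones ≥ 0 and the modulus 2 is positive, so Lean '%' agrees with Python '%' here.
-- loop body of 'for bit_pos in range(block_size)' (kept as a named helper, verbatim)
def stepA (data : List Int) (even_parity : Bool) (parity_bits : List Int) (bit_pos : Int) : List Int :=
  let count_ones : Int :=
    data.foldl (fun count_ones byte =>
      if PySem.Int.band byte (1 <<< bit_pos.toNat) ≠ 0 then count_ones + 1 else count_ones) 0
  let parity_bit : Int :=
    if even_parity then (if count_ones % 2 = 0 then 0 else 1)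
    else (if count_ones % 2 = 1 then 0 else 1)
  if parity_bit ≠ 0 then parity_bits ++ [(1 <<< bit_pos.toNat : Int)]
  else parity_bits ++ [(0 : Int)]

def calculate_block_parity (data : List Int) (block_size : Int) (even_parity : Bool) : Int :=
  let parity_bits : List Int := (PySem.List.pyRange 0 block_size).foldl (stepA data even_parity) []
  parity_bits.foldl (fun checksum bit_value => PySem.Int.bor checksum bit_value) 0

-- ===== PORT B =====
-- 'x ^= byte' loop, then '(1 << block_size) - 1 if block_size > 0 else 0' (shift exact: block_size > 0),
-- '~x' is Int.not, '&' is PySem.Int.band.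
def calculate_block_parity_alt (data : List Int) (block_size : Int) (even_parity : Bool) : Int :=
  let x : Int := data.foldl (fun x byte => PySem.Int.bxor x byte) 0
  let mask : Int := if block_size > 0 then (1 <<< block_size.toNat) - 1 else 0
  PySem.Int.band (if even_parity then x else Int.not x) mask

-- ===== PRECONDITION & SPEC =====
def Spec_calculate_block_parity (data : List Int) (block_size : Int) (even_parity : Bool) (out : Int) : Prop := out = calculate_block_parity_alt data block_size even_parity
instance (data : List Int) (block_size : Int) (even_parity : Bool) (out : Int) : Decidable (Spec_calculate_block_parity data block_size even_parity out) := by unfold Spec_calculate_block_parity; infer_instance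

-- ===== CLAIM (what is proved, stated in full; the proofs are below) =====
def Claim_equal_calculate_block_parity : Prop := ∀ (data : List Int) (block_size : Int) (even_parity : Bool), Dom_calculate_block_parity data block_size even_parity → Spec_calculate_block_parity data block_size even_parity (calculate_block_parity data block_size even_parity)

-- ===== LEMMAS AND PROOFS =====

theorem tb_natCast (u k : Nat) : ((u : Int)).testBit k = u.testBit k := rfl

theorem tb_negSucc (u k : Nat) : (-(u : Int) - 1).testBit k = !u.testBit k := by
  have : -(u : Int) - 1 = Int.negSucc u := by rw [Int.negSucc_eq]; ring
  rw [this]; rfl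

theorem neg_decomp (a : Int) (h : a < 0) : a = -(((-a - 1).toNat : Int)) - 1 := by omega

theorem tb_of_neg (a : Int) (h : a < 0) (k : Nat) :
    a.testBit k = !((-a - 1).toNat).testBit k := by
  conv_lhs => rw [neg_decomp a h]
  exact tb_negSucc _ _

theorem tb_toNat (a : Int) (ha : 0 ≤ a) (k : Nat) : a.testBit k = (a.toNat).testBit k := by
  conv_lhs => rw [← Int.toNat_of_nonneg ha]
  exact tb_natCast _ _

theorem tb_not (a : Int) (k : Nat) : (Int.not a).testBit k = !a.testBit k := by
  cases a <;> simp [Int.not, Int.testBit]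

theorem tb_bxor (a b : Int) (k : Nat) :
    (PySem.Int.bxor a b).testBit k = ((a.testBit k).xor (b.testBit k)) := by
  unfold PySem.Int.bxor
  by_cases ha : 0 ≤ a <;> by_cases hb : 0 ≤ b <;> simp only [ha, hb, if_true, if_false]
  · rw [tb_natCast, Nat.testBit_xor,
      tb_toNat a ha k,
      tb_toNat b hb k]
  · rw [tb_negSucc, Nat.testBit_xor,
      tb_toNat a ha k,
      tb_of_neg b (by omega) k]
    cases (a.toNat).testBit k <;> cases ((-b - 1).toNat).testBit k <;> rfl
  · rw [tb_negSucc, Nat.testBit_xor,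
      tb_toNat b hb k,
      tb_of_neg a (by omega) k]
    cases ((-a - 1).toNat).testBit k <;> cases (b.toNat).testBit k <;> rfl
  · rw [tb_natCast, Nat.testBit_xor, tb_of_neg a (by omega) k, tb_of_neg b (by omega) k]
    cases ((-a - 1).toNat).testBit k <;> cases ((-b - 1).toNat).testBit k <;> rfl

theorem band_two_pow_ne_zero (b : Int) (p : Nat) :
    (PySem.Int.band b ((2 ^ p : Nat) : Int) ≠ 0) ↔ b.testBit p = true := by
  unfold PySem.Int.band
  have h2 : (0 : Int) ≤ ((2 ^ p : Nat) : Int) := by positivity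
  have hp : (0 : Nat) < 2 ^ p := by positivity
  by_cases hb : 0 ≤ b <;> simp only [hb, h2, if_true, if_false]
  · rw [tb_toNat b hb p, Int.toNat_natCast, Nat.and_two_pow]
    cases hh : (b.toNat).testBit p <;> simp [hh] <;> omega
  · rw [tb_of_neg b (by omega) p, Int.toNat_natCast,
      show (2 ^ p) &&& ((-b - 1).toNat) = ((-b - 1).toNat) &&& (2 ^ p) from Nat.and_comm _ _,
      Nat.and_two_pow]
    cases hh : ((-b - 1).toNat).testBit p <;> simp [hh] <;> omega

theorem count_fold (data : List Int) (p : Nat) (c : Int) :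
    data.foldl (fun count_ones byte =>
      if PySem.Int.band byte ((2 ^ p : Nat) : Int) ≠ 0 then count_ones + 1 else count_ones) c
    = c + (data.countP (fun b => b.testBit p)) := by
  induction data generalizing c with
  | nil => simp
  | cons b t ih =>
    simp only [List.foldl_cons, List.countP_cons, ih]
    by_cases hb : b.testBit p = true
    · rw [if_pos ((band_two_pow_ne_zero b p).mpr hb)]
      simp [hb]; omega
    · rw [if_neg (fun hc => hb ((band_two_pow_ne_zero b p).mp hc))]
      simp [hb]

theorem xor_fold (data : List Int) (p : Nat) (a : Int) :
    (data.foldl (fun x byte => PySem.Int.bxor x byte) a).testBit p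
      = ((a.testBit p).xor (decide ((data.countP (fun b => b.testBit p)) % 2 = 1))) := by
  induction data generalizing a with
  | nil => simp
  | cons b t ih =>
    simp only [List.foldl_cons, List.countP_cons, ih, tb_bxor]
    by_cases hb : b.testBit p = true
    · simp only [hb, if_pos]
      have h2 : ∀ c : Nat, (decide ((c + 1) % 2 = 1)) = !(decide (c % 2 = 1)) := by
        intro c; rcases Nat.even_or_odd c with h | h <;>
          · simp [Nat.even_iff, Nat.odd_iff] at h; simp [Nat.add_mod, h]
      rw [h2]
      cases a.testBit p <;> cases decide ((t.countP fun b => b.testBit p) % 2 = 1) <;> rfl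
    · simp only [hb]
      simp only [Bool.false_eq_true, if_false]
      cases a.testBit p <;> simp

-- the Nat-level accumulation of A's OR loop
def orBits (y : Int) (n : Nat) : Nat :=
  (List.range n).foldl (fun c p => c ||| (if y.testBit p then 2 ^ p else 0)) 0

theorem tb_orBits (y : Int) (n k : Nat) :
    (orBits y n).testBit k = (decide (k < n) && y.testBit k) := by
  induction n with
  | zero => simp [orBits]
  | succ n ih =>
    unfold orBits
    rw [List.range_succ, List.foldl_append]
    simp only [List.foldl_cons, List.foldl_nil]
    rw [Nat.testBit_or]
    unfold orBits at ih
    rw [ih]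
    by_cases hk : k = n
    · subst hk
      cases hy : y.testBit k <;> simp [hy, Nat.testBit_two_pow]
    · by_cases hlt : k < n
      · cases hy : y.testBit n <;>
          simp [hy, Nat.testBit_two_pow, hlt, Nat.lt_succ_of_lt hlt, Ne.symm hk]
      · have : ¬ k < n + 1 := by omega
        cases hy : y.testBit n <;>
          simp [hy, Nat.testBit_two_pow, hlt, this, Ne.symm hk]

theorem band_mask_eq (a : Int) (n : Nat) (u : Nat)
    (hu : ∀ k, u.testBit k = (decide (k < n) && a.testBit k)) :
    PySem.Int.band a (((2 ^ n : Nat) : Int) - 1) = (u : Int) := by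
  have hm : (((2 ^ n : Nat) : Int) - 1) = (((2 ^ n - 1 : Nat)) : Int) := by
    have : (0:Nat) < 2 ^ n := by positivity
    omega
  rw [hm]
  unfold PySem.Int.band
  have h2 : (0 : Int) ≤ ((2 ^ n - 1 : Nat) : Int) := by positivity
  by_cases ha : 0 ≤ a <;> simp only [ha, h2, if_true, if_false]
  · rw [Int.toNat_natCast]
    congr 1
    refine Nat.eq_of_testBit_eq (fun k => ?_)
    rw [Nat.testBit_and, Nat.testBit_two_pow_sub_one, hu k,
      tb_toNat a ha k]
    cases (a.toNat).testBit k <;> simp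
  · rw [Int.toNat_natCast]
    congr 1
    set c : Nat := (-a - 1).toNat with hc
    have hsub : 2 ^ n - 1 - (2 ^ n - 1 &&& c) = 2 ^ n - ((2 ^ n - 1 &&& c) + 1) := by
      have : (0:Nat) < 2 ^ n := by positivity
      have hle : (2 ^ n - 1 &&& c) ≤ 2 ^ n - 1 := Nat.and_le_left
      omega
    rw [hsub]
    refine Nat.eq_of_testBit_eq (fun k => ?_)
    have hlt : (2 ^ n - 1 &&& c) < 2 ^ n := by
      have : (0:Nat) < 2 ^ n := by positivity
      have hle : (2 ^ n - 1 &&& c) ≤ 2 ^ n - 1 := Nat.and_le_left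
      omega
    rw [Nat.testBit_two_pow_sub_succ hlt, hu k, tb_of_neg a (by omega) k,
      Nat.testBit_and, Nat.testBit_two_pow_sub_one, ← hc]
    cases c.testBit k <;> cases hk : decide (k < n) <;> simp

theorem pyRange_zero_eq (b : Int) :
    PySem.List.pyRange 0 b = (List.range b.toNat).map (fun (i : Nat) => (i : Int)) := by
  suffices h : ∀ (m : Nat) (a b : Int), (b - a).toNat = m →
      PySem.List.pyRange a b = (List.range m).map (fun (i : Nat) => a + (i : Int)) by
    rw [h b.toNat 0 b (by omega)]
    simp
  intro m
  induction m with
  | zero =>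
    intro a b hm
    have hab : ¬ a < b := by omega
    simp [PySem.List.pyRange, hab]
  | succ m ih =>
    intro a b hm
    rw [PySem.List.pyRange_one_cons (by omega), ih (a + 1) b (by omega), List.range_succ_eq_map]
    simp only [List.map_cons, List.map_map]
    refine congrArg₂ _ (by omega) ?_
    refine List.map_congr_left (fun i _ => ?_)
    simp only [Function.comp_apply]
    omega

-- the XOR of all data, complemented for odd parity
def yOf (data : List Int) (even_parity : Bool) : Int :=
  if even_parity then data.foldl (fun x byte => PySem.Int.bxor x byte) 0
  else Int.not (data.foldl (fun x byte => PySem.Int.bxor x byte) 0)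

theorem tb_yOf (data : List Int) (even_parity : Bool) (p : Nat) :
    (yOf data even_parity).testBit p
      = (if even_parity then decide ((data.countP (fun b => b.testBit p)) % 2 = 1)
         else !decide ((data.countP (fun b => b.testBit p)) % 2 = 1)) := by
  have hx := xor_fold data p 0
  have h0 : (0 : Int).testBit p = false := by
    show (Int.ofNat 0).testBit p = false
    simp [Int.testBit]
  rw [h0] at hx
  simp only [Bool.false_xor] at hx
  cases even_parity <;> simp [yOf, tb_not, hx]

-- A's loop body appends exactly the bit of yOf at position bit_pos (as 2^p or 0)
theorem stepA_eq (data : List Int) (even_parity : Bool) (acc : List Int) (i : Nat) :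
    stepA data even_parity acc ((i : Nat) : Int)
      = acc ++ [((if (yOf data even_parity).testBit i then (2 ^ i : Nat) else 0 : Nat) : Int)] := by
  simp only [stepA, Int.toNat_natCast, Nat.one_shiftLeft, count_fold, zero_add]
  rw [tb_yOf]
  have hmod : ((data.countP (fun b => b.testBit i) : Int)) % 2
      = (((data.countP (fun b => b.testBit i)) % 2 : Nat) : Int) := by omega
  rw [hmod]
  cases even_parity <;>
    rcases Nat.mod_two_eq_zero_or_one (data.countP (fun b => b.testBit i)) with h | h <;>
    simp [h]

theorem foldA (data : List Int) (even_parity : Bool) (n : Nat) (acc : List Int) :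
    ((List.range n).map (fun (i : Nat) => (i : Int))).foldl (stepA data even_parity) acc
      = acc ++ (List.range n).map
          (fun (i : Nat) => ((if (yOf data even_parity).testBit i then (2 ^ i : Nat) else 0 : Nat) : Int)) := by
  induction n generalizing acc with
  | zero => simp
  | succ n ih =>
    rw [List.range_succ, List.map_append, List.foldl_append, ih, List.map_append]
    simp only [List.map_cons, List.map_nil, List.foldl_cons, List.foldl_nil]
    rw [stepA_eq]
    simp [List.append_assoc]

theorem orFold (y : Int) (n : Nat) (c : Nat) :
    ((List.range n).map
        (fun (i : Nat) => ((if y.testBit i then (2 ^ i : Nat) else 0 : Nat) : Int))).foldl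
      (fun checksum bit_value => PySem.Int.bor checksum bit_value) ((c : Nat) : Int)
    = (((List.range n).foldl (fun c p => c ||| (if y.testBit p then 2 ^ p else 0)) c : Nat) : Int) := by
  induction n generalizing c with
  | zero => simp
  | succ n ih =>
    rw [List.range_succ, List.map_append, List.foldl_append, ih, List.foldl_append]
    simp only [List.map_cons, List.map_nil, List.foldl_cons, List.foldl_nil]
    rw [PySem.Int.bor_natCast]

-- A's whole computation equals ↑(orBits (yOf data even_parity) block_size.toNat)
theorem calcA_eq_orBits (data : List Int) (block_size : Int) (even_parity : Bool) :
    calculate_block_parity data block_size even_parity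
      = ((orBits (yOf data even_parity) block_size.toNat : Nat) : Int) := by
  unfold calculate_block_parity
  rw [pyRange_zero_eq, foldA, List.nil_append]
  have h0 : ((0 : Nat) : Int) = (0 : Int) := rfl
  rw [← h0, orFold]
  rfl

theorem main_eq (data : List Int) (block_size : Int) (even_parity : Bool) :
    calculate_block_parity data block_size even_parity
      = calculate_block_parity_alt data block_size even_parity := by
  rw [calcA_eq_orBits]
  simp only [calculate_block_parity_alt, Nat.one_shiftLeft]
  rw [show (if even_parity then data.foldl (fun x byte => PySem.Int.bxor x byte) 0
           else Int.not (data.foldl (fun x byte => PySem.Int.bxor x byte) 0))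
        = yOf data even_parity from by cases even_parity <;> rfl]
  by_cases hbs : block_size > 0
  · simp only [hbs, if_true]
    exact (band_mask_eq (yOf data even_parity) block_size.toNat _
      (fun k => tb_orBits (yOf data even_parity) block_size.toNat k)).symm
  · simp only [hbs, if_false]
    have hz : block_size.toNat = 0 := by omega
    rw [hz]
    simp [orBits, PySem.Int.band_zero]

-- ===== VERDICT (by name: the statement is the Claim_ definition above) =====
theorem calculate_block_parity_spec : Claim_equal_calculate_block_parity := by
  intro data block_size even_parity _
  unfold Spec_calculate_block_parity
  exact main_eq data block_size even_parity
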